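-- pv_equiv track=rewrite | github.com/skvcool-rgb/KOS-Organism | kos/grid_primitives.py | connect_same_color_v
-- ===== SOURCE A (Python) =====
-- from typing import Any, Callable, Dict, List, Tuple
-- from collections import Counter
--
-- Grid = List[List[int]]
--
-- def color_counts(g: Grid) -> Counter:
--     return Counter(c for row in g for c in row)
--
-- def connect_same_color_v(g: Grid) -> Grid:
--     """Connect cells of the same color vertically (fill gap between two same-color cells)."""
--     if not g or not g[0]: return g
--     bg = color_counts(g).most_common(1)[0][0]
--     rows, cols = len(g), len(g[0])
--     result = [row[:] for row in g]
--     for j in range(cols):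
--         for i in range(rows):
--             if g[i][j] == bg: continue
--             c = g[i][j]
--             for k in range(i+1, rows):
--                 if g[k][j] == c:
--                     for m in range(i+1, k):
--                         if result[m][j] == bg:
--                             result[m][j] = c
--                     break
--                 elif g[k][j] != bg:
--                     break
--     return result
-- ===== SOURCE B (Python) =====
-- from collections import Counter
-- from typing import List
--
-- Grid = List[List[int]]
--
-- def _fill_col(col, bg):
--     """Single pass: emit pending bg-run filled with c when bracketed by two c cells."""
--     out = []
--     last = None      # color of the most recent non-bg cell
--     pending = 0      # length of the bg run since that cell
--     for c in col:
--         if c == bg: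
--             pending += 1
--         else:
--             out.extend([c if last == c else bg] * pending)
--             out.append(c)
--             pending = 0
--             last = c
--     out.extend([bg] * pending)
--     return out
--
-- def connect_same_color_v(g: Grid) -> Grid:
--     if not g or not g[0]: return g
--     bg = Counter(c for row in g for c in row).most_common(1)[0][0]
--     cols = [_fill_col(list(col), bg) for col in zip(*g)]
--     n = len(cols)
--     return [list(vals) + row[n:] for row, vals in zip(g, zip(*cols))]
-- ===== Notes on version B (the rewrite author's own statement) =====
-- stated objective: alternative
-- what changed: A scans ahead from every non-background cell for the next same-color cell and then runs a separate fill loop over the gap, mutating a copied grid in place; B transposes the grid once and rebuilds each column in a single forward pass that tracks the last non-background color and the pending background-run length, emitting each gap filled or unfilled as it closes.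
import Mathlib
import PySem

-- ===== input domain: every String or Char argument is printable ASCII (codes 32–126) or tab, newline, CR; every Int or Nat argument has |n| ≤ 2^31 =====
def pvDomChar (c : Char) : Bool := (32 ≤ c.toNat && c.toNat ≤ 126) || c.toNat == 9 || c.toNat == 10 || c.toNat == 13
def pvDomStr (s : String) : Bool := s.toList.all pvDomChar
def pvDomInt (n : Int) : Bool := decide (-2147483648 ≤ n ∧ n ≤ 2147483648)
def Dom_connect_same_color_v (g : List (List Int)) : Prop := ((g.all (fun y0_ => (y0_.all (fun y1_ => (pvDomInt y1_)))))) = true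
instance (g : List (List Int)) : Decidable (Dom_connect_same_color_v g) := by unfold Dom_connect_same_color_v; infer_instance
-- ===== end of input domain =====

-- B replaces A's per-cell forward scan (scan ahead to the next same-color cell, then a
-- fill loop over the gap, mutating a grid copy) by transposing the grid and rebuilding each
-- column in one forward pass that tracks the last non-background color and the pending
-- background-run length; objective: alternative (same cost, different algorithm).

-- ===== PORT A =====

-- Counter(c for row in g for c in row)  (helper color_counts of the module)
def pvColorCounts (g : List (List Int)) : PySem.Dict Int Int :=
  PySem.Dict.counter (g.flatMap (fun row => row))

-- d.most_common(1)[0][0]: first key of maximal count (Counter.most_common(1) keeps the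
-- first-inserted key on ties); unreachable [] case returns 0 (A raises only on an empty
-- counter, which the callers' guard excludes).
def pvMostCommon1 (d : PySem.Dict Int Int) : Int :=
  match d.items with
  | [] => 0
  | it :: rest => (rest.foldl (fun best kv => if best.2 < kv.2 then kv else best) it).1

def pvBg (g : List (List Int)) : Int := pvMostCommon1 (pvColorCounts g)

-- g[i][j] (both indices Python-style; out-of-range default is excluded by Pre_)
def pvGet2 (g : List (List Int)) (i j : Int) : Int :=
  PySem.List.pyGetD (PySem.List.pyGetD g i []) j 0

-- 'if result[m][j] == bg: result[m][j] = c' — one step of A's fill loop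
def pvMStepG (bg c j : Int) (r : List (List Int)) (m : Int) : List (List Int) :=
  if pvGet2 r m j = bg then
    PySem.List.pySetD r m (PySem.List.pySetD (PySem.List.pyGetD r m []) j c)
  else r

-- 'for k in range(i+1, rows): … break' — the scan for the next same-color cell
def pvKloopG (g : List (List Int)) (bg c i j : Int) (r : List (List Int)) :
    List Int → List (List Int)
  | [] => r
  | k :: ks =>
    if pvGet2 g k j = c then (PySem.List.pyRange (i+1) k 1).foldl (pvMStepG bg c j) r
    else if pvGet2 g k j ≠ bg then r
    else pvKloopG g bg c i j r ks

-- body of 'for i in range(rows)'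
def pvIStepG (g : List (List Int)) (bg j : Int) (r : List (List Int)) (i : Int) :
    List (List Int) :=
  if pvGet2 g i j = bg then r
  else pvKloopG g bg (pvGet2 g i j) i j r (PySem.List.pyRange (i+1) (g.length : Int) 1)

def connect_same_color_v (g : List (List Int)) : List (List Int) :=
  if g = [] ∨ g.headD [] = [] then g
  else
    let bg := pvBg g
    let result := g.map (fun row => PySem.List.slice row none none)   -- [row[:] for row in g]
    (PySem.List.pyRange 0 ((g.headD []).length : Int) 1).foldl
      (fun r j => (PySem.List.pyRange 0 (g.length : Int) 1).foldl
        (fun r i => pvIStepG g bg j r i) r)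
      result

-- ===== PORT B =====

-- zip(*g): transpose, truncating at the shortest row; fuel = len(g[0]) suffices
def pvZipGo (g : List (List Int)) : Nat → List (List Int)
  | 0 => []
  | n+1 =>
    if g.any (fun r => r.isEmpty) then []
    else g.map (fun r => r.headD 0) :: pvZipGo (g.map (fun r => r.tail)) n

def pvZip (g : List (List Int)) : List (List Int) :=
  match g with
  | [] => []
  | r :: _ => pvZipGo g r.length

-- _fill_col's loop: last = color of last non-bg cell, pending = bg run since it
def pvFillColGo (bg : Int) (last : Option Int) (pending : Nat) (out : List Int) :
    List Int → List Int
  | [] => out ++ List.replicate pending bg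
  | c :: cs =>
    if c = bg then pvFillColGo bg last (pending + 1) out cs
    else pvFillColGo bg (some c) 0
      (out ++ List.replicate pending (if last = some c then c else bg) ++ [c]) cs

def pvFillCol (col : List Int) (bg : Int) : List Int := pvFillColGo bg none 0 [] col

def connect_same_color_v_alt (g : List (List Int)) : List (List Int) :=
  if g = [] ∨ g.headD [] = [] then g
  else
    let bg := pvBg g
    let cols := (pvZip g).map (fun col => pvFillCol col bg)
    let n := cols.length
    (g.zip (pvZip cols)).map (fun p => p.2 ++ PySem.List.slice p.1 (some (n : Int)) none)

-- ===== PRECONDITION & SPEC =====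
-- Pre_ excludes ragged grids whose first row is nonempty and some later row is shorter:
-- there A's read g[i][j] raises IndexError (A returns on every other input).
def Pre_connect_same_color_v (g : List (List Int)) : Prop :=
  ∀ row ∈ g, (g.headD []).length ≤ row.length

instance (g : List (List Int)) : Decidable (Pre_connect_same_color_v g) := by
  unfold Pre_connect_same_color_v; infer_instance

def pvWitness_connect_same_color_v : List (List Int) := [[1, 0], [0, 0], [1, 2]]

def Spec_connect_same_color_v (g : List (List Int)) (out : List (List Int)) : Prop :=
  out = connect_same_color_v_alt g
instance (g : List (List Int)) (out : List (List Int)) :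
    Decidable (Spec_connect_same_color_v g out) := by
  unfold Spec_connect_same_color_v; infer_instance

-- ===== CLAIM (what is proved, stated in full; the proofs are below) =====
def Claim_equal_connect_same_color_v : Prop :=
  ∀ (g : List (List Int)), Dom_connect_same_color_v g → Pre_connect_same_color_v g →
    Spec_connect_same_color_v g (connect_same_color_v g)

-- ===== LEMMAS AND PROOFS =====
-- first non-background value of a column suffix
def pvFirstNB (bg : Int) : List Int → Option Int
  | [] => none
  | c :: cs => if c = bg then pvFirstNB bg cs else some c

-- reference value of a column after a non-bg cell of color d has been seen
def pvRefFrom (bg d : Int) : List Int → List Int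
  | [] => []
  | c :: cs =>
    if c = bg then (if pvFirstNB bg cs = some d then d else bg) :: pvRefFrom bg d cs
    else c :: pvRefFrom bg c cs

-- reference value of a column that starts with a non-bg cell (or is empty)
def pvRefHead (bg : Int) : List Int → List Int
  | [] => []
  | c :: cs => c :: pvRefFrom bg c cs

theorem pvFirstNB_allbg (bg : Int) (run : List Int) (h : ∀ x ∈ run, x = bg) :
    pvFirstNB bg run = none := by
  induction run with
  | nil => rfl
  | cons x xs ih =>
    have hx := h x (by simp)
    simp [pvFirstNB, hx]
    exact ih (fun y hy => h y (by simp [hy]))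

theorem pvFirstNB_append (bg c' : Int) (run cs : List Int) (h : ∀ x ∈ run, x = bg)
    (hc' : c' ≠ bg) : pvFirstNB bg (run ++ c' :: cs) = some c' := by
  induction run with
  | nil => simp [pvFirstNB, hc']
  | cons x xs ih =>
    have hx := h x (by simp)
    simp [pvFirstNB, hx]
    exact ih (fun y hy => h y (by simp [hy]))

theorem pvRefFrom_allbg (bg d : Int) (run : List Int) (h : ∀ x ∈ run, x = bg) :
    pvRefFrom bg d run = run := by
  induction run with
  | nil => rfl
  | cons x xs ih =>
    have hx := h x (by simp)
    have hxs : ∀ y ∈ xs, y = bg := fun y hy => h y (by simp [hy])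
    simp [pvRefFrom, hx, pvFirstNB_allbg bg xs hxs, ih hxs]

theorem pvRefFrom_append (bg d c' : Int) (run cs : List Int) (h : ∀ x ∈ run, x = bg)
    (hc' : c' ≠ bg) :
    pvRefFrom bg d (run ++ c' :: cs) =
      (if c' = d then List.replicate run.length d else run) ++ c' :: pvRefFrom bg c' cs := by
  induction run with
  | nil => simp [pvRefFrom, hc']
  | cons x xs ih =>
    have hx := h x (by simp)
    have hxs : ∀ y ∈ xs, y = bg := fun y hy => h y (by simp [hy])
    have hf := pvFirstNB_append bg c' xs cs hxs hc'
    subst hx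
    rw [List.cons_append, pvRefFrom, if_pos rfl, hf, ih hxs]
    by_cases hcd : c' = d
    · simp [hcd, List.replicate_succ]
    · have : ¬ ((some c' : Option Int) = some d) := by simpa using hcd
      simp [hcd, this]

-- B's loop with last = some d
theorem pvFillColGo_some (bg : Int) (cs : List Int) : ∀ (d : Int) (p : Nat) (out : List Int),
    pvFillColGo bg (some d) p out cs =
      out ++ List.replicate p (if pvFirstNB bg cs = some d then d else bg) ++ pvRefFrom bg d cs := by
  induction cs with
  | nil => intro d p out; simp [pvFillColGo, pvFirstNB, pvRefFrom]
  | cons c cs ih =>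
    intro d p out
    by_cases hc : c = bg
    · rw [pvFillColGo, if_pos hc, ih]
      have h1 : pvFirstNB bg (c :: cs) = pvFirstNB bg cs := by simp [pvFirstNB, hc]
      have h2 : pvRefFrom bg d (c :: cs) =
          (if pvFirstNB bg cs = some d then d else bg) :: pvRefFrom bg d cs := by
        simp [pvRefFrom, hc]
      rw [h1, h2]
      simp [List.replicate_succ', List.replicate_succ]
    · rw [pvFillColGo, if_neg hc, ih]
      have h1 : pvFirstNB bg (c :: cs) = some c := by simp [pvFirstNB, hc]
      have h2 : pvRefFrom bg d (c :: cs) = c :: pvRefFrom bg c cs := by simp [pvRefFrom, hc]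
      rw [h1, h2]
      by_cases hdc : d = c
      · subst hdc; simp
      · have e1 : ¬ ((some d : Option Int) = some c) := by simpa using hdc
        have e2 : ¬ ((some c : Option Int) = some d) := by simpa using fun h => hdc h.symm
        simp [e1, e2]

-- B's loop from the start, on a column split as (all-bg run) ++ tail
theorem pvFillColGo_none (bg : Int) : ∀ (run : List Int) (tail : List Int) (p : Nat)
    (out : List Int), (∀ x ∈ run, x = bg) →
    (tail = [] ∨ ∃ c cs, tail = c :: cs ∧ c ≠ bg) →
    pvFillColGo bg none p out (run ++ tail) =
      out ++ List.replicate p bg ++ run ++ pvRefHead bg tail := by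
  intro run
  induction run with
  | nil =>
    intro tail p out _ htail
    rcases htail with h | ⟨c, cs, rfl, hc⟩
    · subst h; simp [pvFillColGo, pvRefHead]
    · rw [List.nil_append, pvFillColGo, if_neg hc, pvFillColGo_some]
      simp [pvRefHead, pvFirstNB, hc]
  | cons x xs ih =>
    intro tail p out hbg htail
    have hx := hbg x (by simp)
    rw [List.cons_append, pvFillColGo, if_pos hx]
    rw [ih tail (p+1) out (fun y hy => hbg y (by simp [hy])) htail]
    simp [List.replicate_succ', hx]

theorem pvFillCol_split (bg : Int) (run tail : List Int) (hbg : ∀ x ∈ run, x = bg)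
    (htail : tail = [] ∨ ∃ c cs, tail = c :: cs ∧ c ≠ bg) :
    pvFillCol (run ++ tail) bg = run ++ pvRefHead bg tail := by
  rw [pvFillCol, pvFillColGo_none bg run tail 0 [] hbg htail]; simp


-- ===== column-level image of A's loops =====
def pvMStepC (bg c : Int) (s : List Int) (m : Int) : List Int :=
  if PySem.List.pyGetD s m 0 = bg then PySem.List.pySetD s m c else s

def pvMFillC (bg c a b : Int) (s : List Int) : List Int :=
  (PySem.List.pyRange a b 1).foldl (pvMStepC bg c) s

def pvKloopC (colG : List Int) (bg c i : Int) (s : List Int) : List Int → List Int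
  | [] => s
  | k :: ks =>
    if PySem.List.pyGetD colG k 0 = c then pvMFillC bg c (i+1) k s
    else if PySem.List.pyGetD colG k 0 ≠ bg then s
    else pvKloopC colG bg c i s ks

def pvIStepC (colG : List Int) (bg : Int) (s : List Int) (i : Int) : List Int :=
  if PySem.List.pyGetD colG i 0 = bg then s
  else pvKloopC colG bg (PySem.List.pyGetD colG i 0) i s
    (PySem.List.pyRange (i+1) (colG.length : Int) 1)

def pvIFoldC (colG : List Int) (bg : Int) (s : List Int) (is : List Int) : List Int :=
  is.foldl (pvIStepC colG bg) s

-- ===== index primitives =====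
theorem pvGetD_append_offset (u v : List Int) (i : Int) (hi : 0 ≤ i) :
    PySem.List.pyGetD (u ++ v) ((u.length : Int) + i) 0 = PySem.List.pyGetD v i 0 := by
  obtain ⟨n, rfl⟩ := Int.eq_ofNat_of_zero_le hi
  have : (u.length : Int) + n = ((u.length + n : Nat) : Int) := by push_cast; ring
  rw [this, PySem.List.pyGetD_natCast, PySem.List.pyGetD_natCast]
  rcases Nat.lt_or_ge n v.length with h | h
  · rw [List.getD_eq_getElem _ _ (by simp; omega), List.getD_eq_getElem _ _ h]
    simp [List.getElem_append_right (by omega : u.length ≤ u.length + n)]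
  · rw [List.getD_eq_default _ _ (by simp; omega), List.getD_eq_default _ _ (by omega)]

theorem pvSetD_append_offset (u v : List Int) (i : Int) (hi : 0 ≤ i) (x : Int) :
    PySem.List.pySetD (u ++ v) ((u.length : Int) + i) x = u ++ PySem.List.pySetD v i x := by
  obtain ⟨n, rfl⟩ := Int.eq_ofNat_of_zero_le hi
  have : (u.length : Int) + n = ((u.length + n : Nat) : Int) := by push_cast; ring
  rw [this, PySem.List.pySetD_natCast, PySem.List.pySetD_natCast]
  rw [List.set_append_right _ _ (by omega)]
  simp

theorem pvRange_map_add (d a b : Int) :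
    (PySem.List.pyRange a b 1).map (fun x => d + x) = PySem.List.pyRange (d + a) (d + b) 1 := by
  rw [PySem.List.pyRange_one a b, PySem.List.pyRange_one (d+a) (d+b)]
  have : d + b - (d + a) = b - a := by ring
  rw [this, List.map_map]
  exact List.map_congr_left (fun k _ => by simp; ring)

theorem pvGetD_append_elt (u : List Int) (x : Int) (v : List Int) :
    PySem.List.pyGetD (u ++ x :: v) (u.length : Int) 0 = x := by
  have := pvGetD_append_offset u (x :: v) 0 le_rfl
  simpa using this

-- set at position |u| replaces the head of the right part
theorem pvSetD_append_elt (u : List Int) (x : Int) (v : List Int) (c : Int) :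
    PySem.List.pySetD (u ++ x :: v) (u.length : Int) c = u ++ c :: v := by
  have := pvSetD_append_offset u (x :: v) 0 le_rfl c
  simpa [PySem.List.pySetD_natCast] using this


-- ===== shift lemmas: A's column loops over a prefix-extended column =====
theorem pvMStep_shift (bg c : Int) (u s : List Int) (m : Int) (hm : 0 ≤ m) :
    pvMStepC bg c (u ++ s) ((u.length : Int) + m) = u ++ pvMStepC bg c s m := by
  unfold pvMStepC
  rw [pvGetD_append_offset u s m hm, pvSetD_append_offset u s m hm]
  split_ifs <;> rfl

theorem pvMFill_shift (bg c : Int) (u s : List Int) (a b : Int) (ha : 0 ≤ a) :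
    pvMFillC bg c ((u.length : Int) + a) ((u.length : Int) + b) (u ++ s) =
      u ++ pvMFillC bg c a b s := by
  unfold pvMFillC
  rw [← pvRange_map_add (u.length : Int) a b, List.foldl_map]
  have : ∀ ms : List Int, (∀ m ∈ ms, 0 ≤ m) → ∀ s,
      ms.foldl (fun acc x => pvMStepC bg c acc ((u.length : Int) + x)) (u ++ s) =
        u ++ ms.foldl (pvMStepC bg c) s := by
    intro ms
    induction ms with
    | nil => intro _ s; rfl
    | cons m ms ih =>
      intro hms s
      simp only [List.foldl_cons]
      rw [pvMStep_shift bg c u s m (hms m (by simp)), ih (fun x hx => hms x (by simp [hx]))]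
  exact this _ (fun m hm => le_trans ha (PySem.List.mem_pyRange_one.1 hm).1) s

theorem pvKloop_shift (uG u tG : List Int) (bg c i : Int) (s : List Int)
    (hlen : uG.length = u.length) (hi : 0 ≤ i) :
    ∀ ks : List Int, (∀ k ∈ ks, 0 ≤ k) →
    pvKloopC (uG ++ tG) bg c ((u.length : Int) + i) (u ++ s)
        (ks.map (fun x => (u.length : Int) + x)) =
      u ++ pvKloopC tG bg c i s ks := by
  intro ks
  induction ks generalizing s with
  | nil => intro _; rfl
  | cons k ks ih =>
    intro hks
    have hk : (0:Int) ≤ k := hks k (by simp)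
    simp only [List.map_cons, pvKloopC]
    have hg : PySem.List.pyGetD (uG ++ tG) ((u.length : Int) + k) 0 = PySem.List.pyGetD tG k 0 := by
      rw [← hlen]; exact pvGetD_append_offset uG tG k hk
    have hm : pvMFillC bg c ((u.length : Int) + i + 1) ((u.length : Int) + k) (u ++ s) =
        u ++ pvMFillC bg c (i+1) k s := by
      rw [add_assoc]; exact pvMFill_shift bg c u s (i+1) k (by omega)
    rw [hg, hm]
    split_ifs <;> first | rfl | exact ih s (fun x hx => hks x (by simp [hx]))

theorem pvIStep_shift (uG u tG : List Int) (bg : Int) (s : List Int) (i : Int)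
    (hlen : uG.length = u.length) (hi : 0 ≤ i) :
    pvIStepC (uG ++ tG) bg (u ++ s) ((u.length : Int) + i) =
      u ++ pvIStepC tG bg s i := by
  unfold pvIStepC
  have hg : PySem.List.pyGetD (uG ++ tG) ((u.length : Int) + i) 0 = PySem.List.pyGetD tG i 0 := by
    rw [← hlen]; exact pvGetD_append_offset uG tG i hi
  have hr : PySem.List.pyRange ((u.length : Int) + i + 1) (((uG ++ tG).length : Int)) 1 =
      (PySem.List.pyRange (i+1) (tG.length : Int) 1).map (fun x => (u.length : Int) + x) := by
    rw [pvRange_map_add]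
    have e1 : (u.length : Int) + (i + 1) = (u.length : Int) + i + 1 := by ring
    have e2 : (u.length : Int) + (tG.length : Int) = (((uG ++ tG).length : Int)) := by
      simp [hlen]
    rw [e1, e2]
  rw [hg, hr]
  split_ifs with h
  · rfl
  · exact pvKloop_shift uG u tG bg _ i s hlen hi _
      (fun k hk => by have := (PySem.List.mem_pyRange_one.1 hk).1; omega)

theorem pvIFold_shift (uG u tG : List Int) (bg : Int) (s : List Int)
    (hlen : uG.length = u.length) :
    ∀ is : List Int, (∀ i ∈ is, 0 ≤ i) →
    pvIFoldC (uG ++ tG) bg (u ++ s) (is.map (fun x => (u.length : Int) + x)) =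
      u ++ pvIFoldC tG bg s is := by
  intro is
  induction is generalizing s with
  | nil => intro _; rfl
  | cons i is ih =>
    intro his
    simp only [List.map_cons, pvIFoldC, List.foldl_cons]
    rw [pvIStep_shift uG u tG bg s i hlen (his i (by simp))]
    exact ih _ (fun x hx => his x (by simp [hx]))

-- skip: indices whose column value is bg do nothing
theorem pvIFold_skip (colG : List Int) (bg : Int) (s : List Int) :
    ∀ is : List Int, (∀ i ∈ is, PySem.List.pyGetD colG i 0 = bg) →
    pvIFoldC colG bg s is = s := by
  intro is
  induction is with
  | nil => intro _; rfl
  | cons i is ih =>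
    intro his
    simp only [pvIFoldC, List.foldl_cons]
    rw [show pvIStepC colG bg s i = s from by unfold pvIStepC; rw [if_pos (his i (by simp))]]
    exact ih (fun x hx => his x (by simp [hx]))


-- kloop over an all-bg window that reaches the end of the range: no effect
theorem pvKloop_scan_none (colG : List Int) (bg c i : Int) (hc : c ≠ bg) :
    ∀ (p : Nat) (a b : Int) (s : List Int), 0 ≤ a →
    (∀ k : Int, a ≤ k → k < a + p → PySem.List.pyGetD colG k 0 = bg) → b ≤ a + p →
    pvKloopC colG bg c i s (PySem.List.pyRange a b 1) = s := by
  intro p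
  induction p with
  | zero =>
    intro a b s _ _ hb
    simp only [Nat.cast_zero, add_zero] at hb
    rw [PySem.List.pyRange_one_eq_nil hb]
    rfl
  | succ p ih =>
    intro a b s ha hbg hb
    rcases le_or_gt b a with h | h
    · rw [PySem.List.pyRange_one_eq_nil h]; rfl
    · rw [PySem.List.pyRange_one_cons h]
      simp only [pvKloopC]
      have hga : PySem.List.pyGetD colG a 0 = bg := hbg a le_rfl (by push_cast; omega)
      rw [hga, if_neg (fun h' => hc h'.symm), if_neg (by simp)]
      exact ih (a+1) b s (by omega)
        (fun k h1 h2 => hbg k (by omega) (by push_cast at h2 ⊢; omega))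
        (by push_cast at hb ⊢; omega)

-- kloop over an all-bg window ending at a non-bg cell: fill iff the colors match
theorem pvKloop_scan_hit (colG : List Int) (bg c i : Int) (hc : c ≠ bg) :
    ∀ (p : Nat) (a b : Int) (s : List Int), 0 ≤ a →
    (∀ k : Int, a ≤ k → k < a + p → PySem.List.pyGetD colG k 0 = bg) →
    a + p < b → PySem.List.pyGetD colG (a + p) 0 ≠ bg →
    pvKloopC colG bg c i s (PySem.List.pyRange a b 1) =
      (if PySem.List.pyGetD colG (a + p) 0 = c then pvMFillC bg c (i+1) (a+p) s else s) := by
  intro p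
  induction p with
  | zero =>
    intro a b s ha hbg hab hnb
    simp only [Nat.cast_zero, add_zero] at hab hnb ⊢
    rw [PySem.List.pyRange_one_cons hab]
    simp only [pvKloopC]
    split_ifs with h1
    · rfl
    · rfl
  | succ p ih =>
    intro a b s ha hbg hab hnb
    have hb : a < b := by push_cast at hab; omega
    rw [PySem.List.pyRange_one_cons hb]
    simp only [pvKloopC]
    have hga : PySem.List.pyGetD colG a 0 = bg := hbg a le_rfl (by push_cast; omega)
    rw [hga, if_neg (fun h' => hc h'.symm), if_neg (by simp)]
    have e : a + 1 + (p : Int) = a + ((p+1 : Nat) : Int) := by push_cast; ring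
    rw [ih (a+1) b s (by omega) (fun k h1 h2 => hbg k (by omega) (by push_cast at h2 ⊢; omega))
      (by rw [e]; exact hab) (by rw [e]; exact hnb)]
    rw [e]

-- the fill loop on an all-bg window [ |u| , |u|+p ) turns it into replicate p c
theorem pvMFill_window (bg c : Int) :
    ∀ (run : List Int) (u v : List Int), (∀ x ∈ run, x = bg) →
    pvMFillC bg c (u.length : Int) ((u.length : Int) + run.length) (u ++ run ++ v) =
      u ++ List.replicate run.length c ++ v := by
  intro run
  induction run with
  | nil =>
    intro u v _
    unfold pvMFillC
    rw [PySem.List.pyRange_one_eq_nil (by simp)]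
    simp
  | cons x xs ih =>
    intro u v hbg
    unfold pvMFillC
    have hlt : (u.length : Int) < (u.length : Int) + ((x :: xs).length : Int) := by
      have : (0:Int) < ((x :: xs).length : Int) := by exact_mod_cast Nat.succ_pos xs.length
      omega
    rw [PySem.List.pyRange_one_cons hlt]
    simp only [List.foldl_cons]
    have hstep : pvMStepC bg c (u ++ (x :: xs) ++ v) (u.length : Int) =
        u ++ (c :: xs) ++ v := by
      unfold pvMStepC
      have hread : PySem.List.pyGetD (u ++ (x :: xs) ++ v) (u.length : Int) 0 = x := by
        rw [List.append_assoc, List.cons_append]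
        exact pvGetD_append_elt u x (xs ++ v)
      rw [hread, if_pos (hbg x (by simp))]
      rw [List.append_assoc, List.cons_append, pvSetD_append_elt u x (xs ++ v) c]
      simp
    rw [hstep]
    have e1 : (u.length : Int) + 1 = ((u ++ [c]).length : Int) := by simp
    have e2 : (u.length : Int) + ((x :: xs).length : Int) =
        ((u ++ [c]).length : Int) + (xs.length : Int) := by simp; push_cast; ring
    have e3 : u ++ (c :: xs) ++ v = (u ++ [c]) ++ xs ++ v := by simp
    rw [e1, e2, e3]
    have := ih (u ++ [c]) v (fun y hy => hbg y (by simp [hy]))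
    unfold pvMFillC at this
    rw [this]
    simp [List.replicate_succ]


theorem pvGetD_append_left (u v : List Int) (i : Int) (h0 : 0 ≤ i) (h1 : i < (u.length : Int)) :
    PySem.List.pyGetD (u ++ v) i 0 = PySem.List.pyGetD u i 0 := by
  obtain ⟨n, rfl⟩ := Int.eq_ofNat_of_zero_le h0
  have hn : n < u.length := by exact_mod_cast h1
  rw [PySem.List.pyGetD_natCast, PySem.List.pyGetD_natCast]
  rw [List.getD_eq_getElem _ _ (by simp; omega), List.getD_eq_getElem _ _ hn]
  exact List.getElem_append_left hn

theorem pvGetD_cons_offset (c : Int) (cs : List Int) (j : Int) (hj : 0 ≤ j) :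
    PySem.List.pyGetD (c :: cs) (1 + j) 0 = PySem.List.pyGetD cs j 0 := by
  simpa using pvGetD_append_offset [c] cs j hj

theorem pvGetD_bg (bg : Int) (l : List Int) (i : Int) (h0 : 0 ≤ i) (h1 : i < (l.length : Int))
    (hbg : ∀ x ∈ l, x = bg) : PySem.List.pyGetD l i 0 = bg := by
  obtain ⟨n, rfl⟩ := Int.eq_ofNat_of_zero_le h0
  have hn : n < l.length := by exact_mod_cast h1
  rw [PySem.List.pyGetD_natCast, List.getD_eq_getElem _ _ hn]
  exact hbg _ (List.getElem_mem hn)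

-- every list of colors splits into a leading all-bg run and a rest
theorem pvSplitRun (bg : Int) (l : List Int) :
    ∃ run tail, l = run ++ tail ∧ (∀ x ∈ run, x = bg) ∧
      (tail = [] ∨ ∃ c cs, tail = c :: cs ∧ c ≠ bg) := by
  induction l with
  | nil => exact ⟨[], [], by simp, by simp, Or.inl rfl⟩
  | cons x xs ih =>
    by_cases hx : x = bg
    · obtain ⟨run, tail, heq, hbg, htail⟩ := ih
      refine ⟨x :: run, tail, by simp [heq], ?_, htail⟩
      intro y hy
      rcases List.mem_cons.1 hy with h | h
      · rw [h, hx]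
      · exact hbg y h
    · exact ⟨[], x :: xs, by simp, by simp, Or.inr ⟨x, xs, rfl, hx⟩⟩

-- MAIN: A's row loop on a column = leading run kept + reference fill of the rest
theorem pvMain (bg : Int) : ∀ (n : Nat) (tail run pfx : List Int),
    tail.length ≤ n → (∀ x ∈ run, x = bg) → pfx.length = run.length →
    (tail = [] ∨ ∃ c cs, tail = c :: cs ∧ c ≠ bg) →
    pvIFoldC (run ++ tail) bg (pfx ++ tail)
      (PySem.List.pyRange 0 (((run ++ tail).length : Int)) 1) =
      pfx ++ pvRefHead bg tail := by
  intro n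
  induction n with
  | zero =>
    intro tail run pfx hn hbg hlen htail
    have : tail = [] := List.length_eq_zero_iff.1 (Nat.le_zero.1 hn)
    subst this
    rw [List.append_nil, List.append_nil]
    rw [pvIFold_skip _ _ _ _ (fun i hi => by
      have h := PySem.List.mem_pyRange_one.1 hi
      exact pvGetD_bg bg run i h.1 (by simpa using h.2) hbg)]
    simp [pvRefHead]
  | succ n ih =>
    intro tail run pfx hn hbg hlen htail
    set q : Int := (run.length : Int) with hq
    set T : Int := (tail.length : Int) with hT
    have hsplitrange : PySem.List.pyRange 0 (((run ++ tail).length : Int)) 1 =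
        PySem.List.pyRange 0 q 1 ++ PySem.List.pyRange q (q + T) 1 := by
      have : (((run ++ tail).length : Int)) = q + T := by simp [hq, hT]
      rw [this]
      exact PySem.List.pyRange_one_append 0 q (q+T) (by positivity) (by omega)
    rw [hsplitrange]
    unfold pvIFoldC
    rw [List.foldl_append]
    have hskip : (PySem.List.pyRange 0 q 1).foldl (pvIStepC (run ++ tail) bg) (pfx ++ tail) =
        pfx ++ tail := by
      have := pvIFold_skip (run ++ tail) bg (pfx ++ tail) (PySem.List.pyRange 0 q 1)
        (fun i hi => by
          have h := PySem.List.mem_pyRange_one.1 hi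
          rw [pvGetD_append_left run tail i h.1 h.2]
          exact pvGetD_bg bg run i h.1 h.2 hbg)
      simpa [pvIFoldC] using this
    rw [hskip]
    have hmaprange : PySem.List.pyRange q (q + T) 1 =
        (PySem.List.pyRange 0 T 1).map (fun x => (pfx.length : Int) + x) := by
      have hpfx : (pfx.length : Int) = q := by simp [hq, hlen]
      rw [hpfx, pvRange_map_add q 0 T, add_zero]
    rw [hmaprange]
    have hshift := pvIFold_shift run pfx tail bg tail (by simp [hlen]) (PySem.List.pyRange 0 T 1)
      (fun i hi => (PySem.List.mem_pyRange_one.1 hi).1)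
    unfold pvIFoldC at hshift
    rw [hshift]
    congr 1
    -- now: the fold on the tail alone
    rcases htail with rfl | ⟨c, cs, rfl, hc⟩
    · have hT0 : T = 0 := by simp [hT]
      rw [hT0, PySem.List.pyRange_one_eq_nil le_rfl]
      simp [pvRefHead]
    · -- tail = c :: cs with c ≠ bg
      obtain ⟨run', tail', hcs, hbg', htail'⟩ := pvSplitRun bg cs
      set p : Int := (run'.length : Int) with hp
      have hT1 : T = 1 + (cs.length : Int) := by simp [hT]; push_cast; ring
      have hT0 : (0:Int) < T := by omega
      rw [PySem.List.pyRange_one_cons hT0]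
      simp only [List.foldl_cons]
      have hstep0 : pvIStepC (c :: cs) bg (c :: cs) 0 =
          pvKloopC (c :: cs) bg c 0 (c :: cs) (PySem.List.pyRange 1 ((c :: cs).length : Int) 1) := by
        unfold pvIStepC
        rw [PySem.List.pyGetD_zero_cons, if_neg hc]
        norm_num
      rw [hstep0]
      simp only [zero_add]
      -- window [1, 1+p) of c :: cs is all bg
      have hwin : ∀ k : Int, 1 ≤ k → k < 1 + p → PySem.List.pyGetD (c :: cs) k 0 = bg := by
        intro k h1 h2
        have : k = 1 + (k - 1) := by ring
        rw [this, pvGetD_cons_offset c cs (k-1) (by omega)]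
        rw [hcs, pvGetD_append_left run' tail' (k-1) (by omega) (by omega)]
        exact pvGetD_bg bg run' (k-1) (by omega) (by omega) hbg'
      have hclen : ((c :: cs).length : Int) = 1 + (cs.length : Int) := by push_cast; simp; ring
      rcases htail' with rfl | ⟨c', cs'', htl, hc'⟩
      · -- no non-bg cell after c: kloop is a no-op, rest of loop skips
        have hcs' : cs = run' := by simpa using hcs
        have hkl : pvKloopC (c :: cs) bg c 0 (c :: cs)
            (PySem.List.pyRange 1 ((c :: cs).length : Int) 1) = c :: cs := by
          apply pvKloop_scan_none (c :: cs) bg c 0 hc run'.length 1 _ _ (by omega) hwin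
          rw [hclen, hcs']
        rw [hkl]
        have hrest : (PySem.List.pyRange 1 T 1).foldl (pvIStepC (c :: cs) bg) (c :: cs) =
            c :: cs := by
          have hmr : PySem.List.pyRange 1 T 1 =
              (PySem.List.pyRange 0 (cs.length : Int) 1).map (fun x => (([c] : List Int).length : Int) + x) := by
            simp only [List.length_cons, List.length_nil]
            rw [pvRange_map_add, add_zero, hT1]
            norm_num
          rw [hmr]
          have hsh1 := pvIFold_shift [c] [c] cs bg cs rfl (PySem.List.pyRange 0 (cs.length : Int) 1)
            (fun i hi => (PySem.List.mem_pyRange_one.1 hi).1)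
          unfold pvIFoldC at hsh1
          simp only [List.cons_append, List.nil_append] at hsh1
          rw [hsh1]
          have := pvIFold_skip cs bg cs (PySem.List.pyRange 0 (cs.length : Int) 1)
            (fun i hi => by
              have h := PySem.List.mem_pyRange_one.1 hi
              exact pvGetD_bg bg cs i h.1 h.2 (hcs' ▸ hbg'))
          unfold pvIFoldC at this
          rw [this]
        rw [hrest]
        simp [pvRefHead, pvRefFrom_allbg bg c cs (hcs' ▸ hbg')]
      · -- next non-bg cell c' exists
        subst htl
        have hread : PySem.List.pyGetD (c :: cs) (1 + p) 0 = c' := by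
          rw [pvGetD_cons_offset c cs p (by positivity), hcs, hp]
          exact pvGetD_append_elt run' c' cs''
        have hlt : 1 + p < ((c :: cs).length : Int) := by
          rw [hclen, hcs]
          simp
          push_cast
          omega
        have hkl := pvKloop_scan_hit (c :: cs) bg c 0 hc run'.length 1
          ((c :: cs).length : Int) (c :: cs) (by omega) hwin (by rw [← hp]; exact hlt)
          (by rw [← hp, hread]; exact hc')
        rw [← hp, hread] at hkl
        rw [hkl]
        set W : List Int := if c' = c then List.replicate run'.length c else run' with hW
        have hWlen : W.length = run'.length := by
          rw [hW]; split_ifs <;> simp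
        have hfill : (if c' = c then pvMFillC bg c (0+1) (1+p) (c :: cs) else c :: cs) =
            c :: (W ++ (c' :: cs'')) := by
          rw [hW]
          split_ifs with hcc
          · have e : c :: cs = [c] ++ run' ++ (c' :: cs'') := by simp [hcs]
            have e2 : (0:Int)+1 = (([c] : List Int).length : Int) := by norm_num
            have e3 : (1:Int)+p = (([c] : List Int).length : Int) + (run'.length : Int) := by
              simp [hp]
            rw [e, e2, e3, pvMFill_window bg c run' [c] (c' :: cs'') hbg']
            simp
          · simp [hcs]
        rw [hfill]
        -- remaining iterations: shift off the head cell, then apply the IH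
        have hmr : PySem.List.pyRange 1 T 1 =
            (PySem.List.pyRange 0 (cs.length : Int) 1).map (fun x => (([c] : List Int).length : Int) + x) := by
          simp only [List.length_cons, List.length_nil]
          rw [pvRange_map_add, add_zero, hT1]
          norm_num
        rw [hmr]
        have hsh := pvIFold_shift [c] [c] cs bg (W ++ (c' :: cs'')) rfl
          (PySem.List.pyRange 0 (cs.length : Int) 1)
          (fun i hi => (PySem.List.mem_pyRange_one.1 hi).1)
        unfold pvIFoldC at hsh
        simp only [List.cons_append, List.nil_append] at hsh
        rw [hsh]
        have hihlen : (c' :: cs'').length ≤ n := by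
          have h1 : cs.length = run'.length + (c' :: cs'').length := by rw [hcs]; simp
          have h2 : (c :: cs).length ≤ n + 1 := hn
          simp at h2
          omega
        have hih := ih (c' :: cs'') run' W hihlen hbg' (by rw [hWlen]) (Or.inr ⟨c', cs'', rfl, hc'⟩)
        unfold pvIFoldC at hih
        rw [← hcs] at hih
        rw [hih]
        simp only [pvRefHead]
        rw [hcs, pvRefFrom_append bg c c' run' cs'' hbg' hc']


-- A's row loop on one column computes exactly B's single-pass fill of that column
theorem pvColEq (col : List Int) (bg : Int) :
    pvIFoldC col bg col (PySem.List.pyRange 0 (col.length : Int) 1) = pvFillCol col bg := by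
  obtain ⟨run, tail, rfl, hbg, htail⟩ := pvSplitRun bg col
  rw [pvMain bg tail.length tail run run le_rfl hbg rfl htail,
    pvFillCol_split bg run tail hbg htail]


-- ===== grid layer: A's loops act on one column at a time =====
def pvColOf (r : List (List Int)) (j : Int) : List Int :=
  r.map (fun row => PySem.List.pyGetD row j 0)

def pvSetCol (r : List (List Int)) (j : Int) (w : List Int) : List (List Int) :=
  List.zipWith (fun row v => PySem.List.pySetD row j v) r w

theorem pvGetD_nil_int (j : Int) : PySem.List.pyGetD ([] : List Int) j 0 = 0 := by
  apply PySem.List.pyGetD_of_none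
  rw [PySem.List.pyGet?_eq_none_iff]
  simp [PySem.Raise.InRange]

theorem pvGet2_colOf (r : List (List Int)) (m j : Int) :
    pvGet2 r m j = PySem.List.pyGetD (pvColOf r j) m 0 := by
  have := PySem.List.pyGetD_map (fun row => PySem.List.pyGetD row j 0) r m []
  rw [pvGetD_nil_int j] at this
  exact this.symm

theorem pvColOf_length (r : List (List Int)) (j : Int) : (pvColOf r j).length = r.length := by
  simp [pvColOf]

theorem pvSetCol_length (r : List (List Int)) (j : Int) (w : List Int)
    (h : w.length = r.length) : (pvSetCol r j w).length = r.length := by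
  simp [pvSetCol, h]

theorem pvSetCol_getElem (r : List (List Int)) (j : Int) (w : List Int) (i : Nat)
    (hi : i < r.length) (hc : i < w.length) (h2 : i < (pvSetCol r j w).length) :
    (pvSetCol r j w)[i] = PySem.List.pySetD (r[i]'hi) j (w[i]'hc) := by
  simp [pvSetCol]

theorem pvGetD_set_self (l : List Int) (n : Nat) (v : Int) (h : n < l.length) :
    (l.set n v).getD n 0 = v := by
  rw [List.getD_eq_getElem _ _ (by simp [h])]
  simp [h]

theorem pvSet_getD_self (l : List Int) (n : Nat) :
    l.set n (l.getD n 0) = l := by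
  rcases Nat.lt_or_ge n l.length with h | h
  · rw [List.getD_eq_getElem _ _ h]; exact List.set_getElem_self h
  · exact List.set_eq_of_length_le h

theorem pvColOf_setCol (r : List (List Int)) (jn : Nat) (w : List Int)
    (hlen : w.length = r.length) (hj : ∀ row ∈ r, jn < row.length) :
    pvColOf (pvSetCol r (jn : Int) w) (jn : Int) = w := by
  apply List.ext_getElem
  · simp [pvColOf, pvSetCol, hlen]
  · intro i h1 h2
    have hi : i < r.length := by omega
    have hsc : i < (pvSetCol r (jn : Int) w).length := by
      rw [pvSetCol_length r _ w hlen]; omega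
    simp only [pvColOf, List.getElem_map]
    rw [pvSetCol_getElem r _ w i hi h2 hsc]
    rw [PySem.List.pySetD_natCast, PySem.List.pyGetD_natCast]
    exact pvGetD_set_self _ jn _ (by
      have hmem : r[i] ∈ r := List.getElem_mem hi
      have := hj _ hmem
      simpa [List.length_set])

theorem pvSetCol_colOf_self (r : List (List Int)) (jn : Nat) :
    pvSetCol r (jn : Int) (pvColOf r (jn : Int)) = r := by
  apply List.ext_getElem
  · simp [pvSetCol, pvColOf]
  · intro i h1 h2
    have hcl : i < (pvColOf r (jn : Int)).length := by rw [pvColOf_length]; omega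
    rw [pvSetCol_getElem r _ _ i h2 hcl h1]
    simp only [pvColOf, List.getElem_map]
    rw [PySem.List.pySetD_natCast, PySem.List.pyGetD_natCast]
    exact pvSet_getD_self _ jn

theorem pvMStepC_length (bg cv : Int) (w : List Int) (m : Int) :
    (pvMStepC bg cv w m).length = w.length := by
  unfold pvMStepC
  split_ifs <;> simp [PySem.List.length_pySetD]

theorem pvMFillC_length (bg cv a b : Int) (w : List Int) :
    (pvMFillC bg cv a b w).length = w.length := by
  unfold pvMFillC
  generalize PySem.List.pyRange a b 1 = ms
  induction ms generalizing w with
  | nil => rfl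
  | cons m ms ih => simp only [List.foldl_cons]; rw [ih, pvMStepC_length]

theorem pvKloopC_length (colG : List Int) (bg cv i : Int) (w : List Int) :
    ∀ ks, (pvKloopC colG bg cv i w ks).length = w.length := by
  intro ks
  induction ks with
  | nil => rfl
  | cons k ks ih =>
    simp only [pvKloopC]
    split_ifs <;> first | rfl | exact pvMFillC_length .. | exact ih

theorem pvIStepC_length (colG : List Int) (bg : Int) (w : List Int) (i : Int) :
    (pvIStepC colG bg w i).length = w.length := by
  unfold pvIStepC
  split_ifs <;> first | rfl | exact pvKloopC_length ..

theorem pvSetCol_set (r0 : List (List Int)) (jn : Nat) (w : List Int) (mn : Nat) (cv : Int)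
    (hw : w.length = r0.length) (hm : mn < r0.length) :
    pvSetCol r0 (jn : Int) (w.set mn cv) =
      (pvSetCol r0 (jn : Int) w).set mn (PySem.List.pySetD (r0[mn]'hm) (jn : Int) cv) := by
  apply List.ext_getElem
  · simp [pvSetCol, hw]
  · intro i h1 h2
    have hi : i < r0.length := by simp [pvSetCol, hw] at h1; omega
    rw [List.getElem_set]
    rw [pvSetCol_getElem r0 _ _ i hi (by simp [hw]; omega) h1]
    split_ifs with hieq
    · subst hieq; simp [hm]
    · rw [pvSetCol_getElem r0 _ w i hi (by omega) (by rw [pvSetCol_length r0 _ w hw]; omega)]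
      rw [List.getElem_set_ne (by omega)]

-- one fill step on the grid is one fill step on the column
theorem pvMStepG_sim (r0 : List (List Int)) (bg cv : Int) (jn : Nat) (w : List Int)
    (hw : w.length = r0.length) (hj : ∀ row ∈ r0, jn < row.length) (m : Int)
    (hm0 : 0 ≤ m) (hmr : m < (r0.length : Int)) :
    pvMStepG bg cv (jn : Int) (pvSetCol r0 (jn : Int) w) m =
      pvSetCol r0 (jn : Int) (pvMStepC bg cv w m) := by
  obtain ⟨mn, rfl⟩ := Int.eq_ofNat_of_zero_le hm0
  have hmn : mn < r0.length := by exact_mod_cast hmr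
  unfold pvMStepG pvMStepC
  rw [pvGet2_colOf, pvColOf_setCol r0 jn w hw hj]
  split_ifs with hbg
  · have hscl : mn < (pvSetCol r0 (jn:Int) w).length := by rw [pvSetCol_length r0 _ w hw]; omega
    have hget : PySem.List.pyGetD (pvSetCol r0 (jn:Int) w) (mn : Int) [] =
        PySem.List.pySetD (r0[mn]'hmn) (jn : Int) (w[mn]'(by omega)) := by
      rw [PySem.List.pyGetD_natCast, List.getD_eq_getElem _ _ hscl]
      exact pvSetCol_getElem r0 _ w mn hmn (by omega) hscl
    rw [hget]
    simp only [PySem.List.pySetD_natCast, List.set_set]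
    rw [pvSetCol_set r0 jn w mn cv hw hmn]
    simp only [PySem.List.pySetD_natCast]
  · rfl

-- the fill loop on the grid is the fill loop on the column
theorem pvMFillG_sim (r0 : List (List Int)) (bg cv : Int) (jn : Nat)
    (hj : ∀ row ∈ r0, jn < row.length) :
    ∀ ms : List Int, (∀ m ∈ ms, 0 ≤ m ∧ m < (r0.length : Int)) →
    ∀ w : List Int, w.length = r0.length →
    ms.foldl (pvMStepG bg cv (jn : Int)) (pvSetCol r0 (jn : Int) w) =
      pvSetCol r0 (jn : Int) (ms.foldl (pvMStepC bg cv) w) := by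
  intro ms
  induction ms with
  | nil => intro _ w _; rfl
  | cons m ms ih =>
    intro hms w hw
    simp only [List.foldl_cons]
    rw [pvMStepG_sim r0 bg cv jn w hw hj m (hms m (by simp)).1 (hms m (by simp)).2]
    exact ih (fun x hx => hms x (by simp [hx])) _ (by rw [pvMStepC_length, hw])

-- the scan loop on the grid is the scan loop on the column
theorem pvKloopG_sim (g r0 : List (List Int)) (bg cv : Int) (jn : Nat) (i : Int)
    (hj : ∀ row ∈ r0, jn < row.length) (hi : 0 ≤ i) :
    ∀ ks : List Int, (∀ k ∈ ks, k ≤ (r0.length : Int)) →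
    ∀ w : List Int, w.length = r0.length →
    pvKloopG g bg cv i (jn : Int) (pvSetCol r0 (jn : Int) w) ks =
      pvSetCol r0 (jn : Int) (pvKloopC (pvColOf g (jn : Int)) bg cv i w ks) := by
  intro ks
  induction ks with
  | nil => intro _ w _; rfl
  | cons k ks ih =>
    intro hks w hw
    simp only [pvKloopG, pvKloopC]
    rw [pvGet2_colOf]
    split_ifs
    · unfold pvMFillC
      exact pvMFillG_sim r0 bg cv jn hj (PySem.List.pyRange (i+1) k 1)
        (fun m hm => by
          have h := PySem.List.mem_pyRange_one.1 hm
          exact ⟨by omega, by have := hks k (by simp); omega⟩) w hw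
    · rfl
    · exact ih (fun x hx => hks x (by simp [hx])) w hw

-- one row step on the grid is one row step on the column
theorem pvIStepG_sim (g r0 : List (List Int)) (bg : Int) (jn : Nat) (i : Int)
    (hj : ∀ row ∈ r0, jn < row.length) (hi : 0 ≤ i) (hRg : r0.length = g.length)
    (w : List Int) (hw : w.length = r0.length) :
    pvIStepG g bg (jn : Int) (pvSetCol r0 (jn : Int) w) i =
      pvSetCol r0 (jn : Int) (pvIStepC (pvColOf g (jn : Int)) bg w i) := by
  unfold pvIStepG pvIStepC
  rw [pvGet2_colOf g]
  split_ifs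
  · rfl
  · have hcl : ((pvColOf g (jn : Int)).length : Int) = (g.length : Int) := by
      rw [pvColOf_length]
    rw [hcl]
    exact pvKloopG_sim g r0 bg _ jn i hj hi (PySem.List.pyRange (i+1) (g.length : Int) 1)
      (fun k hk => by
        have h := PySem.List.mem_pyRange_one.1 hk
        omega) w hw

-- the whole row loop on the grid is the whole row loop on the column
theorem pvIFoldG_sim (g r0 : List (List Int)) (bg : Int) (jn : Nat)
    (hj : ∀ row ∈ r0, jn < row.length) (hRg : r0.length = g.length) :
    ∀ is : List Int, (∀ i ∈ is, 0 ≤ i) → ∀ w : List Int, w.length = r0.length →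
    is.foldl (fun r i => pvIStepG g bg (jn : Int) r i) (pvSetCol r0 (jn : Int) w) =
      pvSetCol r0 (jn : Int) (pvIFoldC (pvColOf g (jn : Int)) bg w is) := by
  intro is
  induction is with
  | nil => intro _ w _; rfl
  | cons i is ih =>
    intro his w hw
    simp only [List.foldl_cons, pvIFoldC]
    rw [pvIStepG_sim g r0 bg jn i hj (his i (by simp)) hRg w hw]
    have := ih (fun x hx => his x (by simp [hx])) (pvIStepC (pvColOf g (jn : Int)) bg w i)
      (by rw [pvIStepC_length, hw])
    simpa [pvIFoldC] using this

-- A's inner double loop for column j replaces that column by B's filled column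
theorem pvInner (g r : List (List Int)) (bg : Int) (jn : Nat)
    (hj : ∀ row ∈ r, jn < row.length) (hRg : r.length = g.length)
    (hcol : pvColOf r (jn : Int) = pvColOf g (jn : Int)) :
    (PySem.List.pyRange 0 (g.length : Int) 1).foldl
        (fun r i => pvIStepG g bg (jn : Int) r i) r =
      pvSetCol r (jn : Int) (pvFillCol (pvColOf g (jn : Int)) bg) := by
  conv_lhs => rw [← pvSetCol_colOf_self r jn]
  rw [pvIFoldG_sim g r bg jn hj hRg (PySem.List.pyRange 0 (g.length : Int) 1)
    (fun i hi => (PySem.List.mem_pyRange_one.1 hi).1) (pvColOf r (jn : Int)) (pvColOf_length r _)]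
  rw [hcol]
  congr 1
  have := pvColEq (pvColOf g (jn : Int)) bg
  rw [pvColOf_length] at this
  rw [← hRg] at this ⊢
  exact this


-- ===== outer loop: columns processed left to right =====
def pvNewCol (g : List (List Int)) (bg : Int) (j : Nat) : List Int :=
  pvFillCol (pvColOf g (j : Int)) bg

def pvAState (g : List (List Int)) (bg : Int) : Nat → List (List Int)
  | 0 => g
  | m+1 => pvSetCol (pvAState g bg m) (m : Int) (pvNewCol g bg m)

theorem pvFillColGo_length (bg : Int) :
    ∀ (cs : List Int) (last : Option Int) (p : Nat) (out : List Int),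
    (pvFillColGo bg last p out cs).length = out.length + p + cs.length := by
  intro cs
  induction cs with
  | nil => intro last p out; simp [pvFillColGo]
  | cons c cs ih =>
    intro last p out
    rw [pvFillColGo]
    split_ifs <;> (rw [ih]; simp; omega)

theorem pvFillCol_length (col : List Int) (bg : Int) :
    (pvFillCol col bg).length = col.length := by
  rw [pvFillCol, pvFillColGo_length]; simp

theorem pvNewCol_length (g : List (List Int)) (bg : Int) (j : Nat) :
    (pvNewCol g bg j).length = g.length := by
  rw [pvNewCol, pvFillCol_length, pvColOf_length]

theorem pvAState_length (g : List (List Int)) (bg : Int) :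
    ∀ m, (pvAState g bg m).length = g.length := by
  intro m
  induction m with
  | zero => rfl
  | succ m ih =>
    rw [pvAState, pvSetCol_length _ _ _ (by rw [pvNewCol_length, ih]), ih]

theorem pvAState_rows (g : List (List Int)) (bg : Int) (C : Nat)
    (hC : ∀ row ∈ g, C ≤ row.length) :
    ∀ m, ∀ row ∈ pvAState g bg m, C ≤ row.length := by
  intro m
  induction m with
  | zero => exact hC
  | succ m ih =>
    intro row hrow
    rw [pvAState] at hrow
    obtain ⟨i, hilt, heq⟩ := List.mem_iff_getElem.1 hrow
    have h1 : i < (pvAState g bg m).length := by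
      rw [pvSetCol_length _ _ _ (by rw [pvNewCol_length, pvAState_length])] at hilt
      omega
    have h2 : i < (pvNewCol g bg m).length := by
      rw [pvNewCol_length]; rw [pvAState_length] at h1; omega
    rw [pvSetCol_getElem _ _ _ i h1 h2 hilt] at heq
    rw [← heq, PySem.List.pySetD_natCast, List.length_set]
    exact ih _ (List.getElem_mem h1)

theorem pvColOf_setCol_ne (r : List (List Int)) (j' j : Nat) (w : List Int)
    (hw : w.length = r.length) (hne : j' ≠ j) :
    pvColOf (pvSetCol r (j' : Int) w) (j : Int) = pvColOf r (j : Int) := by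
  apply List.ext_getElem
  · rw [pvColOf_length, pvColOf_length, pvSetCol_length _ _ _ hw]
  · intro i h1 h2
    have hi : i < r.length := by rw [pvColOf_length] at h2; omega
    simp only [pvColOf, List.getElem_map]
    rw [pvSetCol_getElem r _ w i hi (by omega) (by rw [pvSetCol_length _ _ _ hw]; omega)]
    rw [PySem.List.pySetD_natCast, PySem.List.pyGetD_natCast, PySem.List.pyGetD_natCast]
    rcases Nat.lt_or_ge j ((r[i]'hi).length) with h | h
    · rw [List.getD_eq_getElem _ _ (by simp; omega), List.getD_eq_getElem _ _ h]
      exact List.getElem_set_ne (by omega) _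
    · rw [List.getD_eq_default _ _ (by simp; omega), List.getD_eq_default _ _ (by omega)]

theorem pvAState_colOf (g : List (List Int)) (bg : Int) :
    ∀ m (j : Nat), m ≤ j → pvColOf (pvAState g bg m) (j : Int) = pvColOf g (j : Int) := by
  intro m
  induction m with
  | zero => intro j _; rfl
  | succ m ih =>
    intro j hj
    rw [pvAState, pvColOf_setCol_ne _ m j _ (by rw [pvNewCol_length, pvAState_length])
      (by omega)]
    exact ih j (by omega)

-- the outer loop over the first m columns yields pvAState m
theorem pvOuter (g : List (List Int)) (bg : Int) (C : Nat)
    (hC : ∀ row ∈ g, C ≤ row.length) :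
    ∀ m, m ≤ C →
    (PySem.List.pyRange 0 (m : Int) 1).foldl
        (fun r j => (PySem.List.pyRange 0 (g.length : Int) 1).foldl
          (fun r i => pvIStepG g bg j r i) r) g =
      pvAState g bg m := by
  intro m
  induction m with
  | zero => intro _; rw [Nat.cast_zero, PySem.List.pyRange_one_eq_nil le_rfl]; rfl
  | succ m ih =>
    intro hm
    have e : ((m+1 : Nat) : Int) = (m : Int) + 1 := by push_cast; ring
    rw [e, PySem.List.pyRange_one_succ_right (by positivity), List.foldl_append,
      ih (by omega)]
    simp only [List.foldl_cons, List.foldl_nil]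
    rw [pvAState]
    exact pvInner g (pvAState g bg m) bg m
      (fun row hrow => lt_of_lt_of_le (by omega) (pvAState_rows g bg C hC m row hrow))
      (pvAState_length g bg m)
      (pvAState_colOf g bg m m le_rfl)

-- row i of the final state
theorem pvAState_getElem (g : List (List Int)) (bg : Int) (C : Nat)
    (hC : ∀ row ∈ g, C ≤ row.length) :
    ∀ m, m ≤ C → ∀ (i : Nat) (hi : i < g.length),
    (pvAState g bg m)[i]'(by rw [pvAState_length]; omega) =
      (List.range m).map (fun j => (pvNewCol g bg j).getD i 0) ++ (g[i]'hi).drop m := by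
  intro m
  induction m with
  | zero => intro _ i hi; simp [pvAState]
  | succ m ih =>
    intro hm i hi
    simp only [pvAState]
    have h1 : i < (pvAState g bg m).length := by rw [pvAState_length]; omega
    have h2 : i < (pvNewCol g bg m).length := by rw [pvNewCol_length]; omega
    rw [pvSetCol_getElem _ _ _ i h1 h2
      (by rw [pvSetCol_length _ _ _ (by rw [pvNewCol_length, pvAState_length])]; omega)]
    rw [PySem.List.pySetD_natCast, ih (by omega) i hi]
    have hrowlen : C ≤ (g[i]'hi).length := hC _ (List.getElem_mem hi)
    have hmlen : m < (g[i]'hi).length := by omega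
    rw [List.set_append_right _ _ (by simp)]
    have hdrop : (g[i]'hi).drop m = (g[i]'hi)[m] :: (g[i]'hi).drop (m+1) :=
      (List.getElem_cons_drop hmlen).symm
    rw [hdrop]
    simp only [List.length_map, List.length_range, Nat.sub_self, List.set_cons_zero]
    rw [List.range_succ, List.map_append]
    simp only [List.map_cons, List.map_nil]
    rw [List.append_assoc]
    congr 1
    rw [List.getD_eq_getElem _ _ (by rw [pvNewCol_length]; omega)]
    simp

-- ===== B-side: the transpose computes the columns =====
theorem pvZipGo_spec : ∀ (C : Nat) (g : List (List Int)), g ≠ [] →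
    (∀ r ∈ g, C ≤ r.length) →
    pvZipGo g C = (List.range C).map (fun j => g.map (fun row => row.getD j 0)) := by
  intro C
  induction C with
  | zero => intro g _ _; simp [pvZipGo]
  | succ C ih =>
    intro g hne hlen
    have hany : g.any (fun r => r.isEmpty) = false := by
      rw [List.any_eq_false]
      intro r hr
      have := hlen r hr
      simp [List.isEmpty_iff]
      intro h
      rw [h] at this
      simp at this
    rw [pvZipGo, if_neg (by simp [hany])]
    rw [ih (g.map (fun r => r.tail)) (by simpa using hne)
      (fun r hr => by
        obtain ⟨r0, hr0, rfl⟩ := List.mem_map.1 hr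
        have := hlen r0 hr0
        simp [List.length_tail]
        omega)]
    rw [List.range_succ_eq_map, List.map_cons, List.map_map]
    congr 1
    · apply List.map_congr_left
      intro row hrow
      have h1 : 1 ≤ row.length := le_trans (by omega) (hlen row hrow)
      cases row with
      | nil => simp at h1
      | cons a t => rfl
    · apply List.map_congr_left
      intro j _
      simp only [Function.comp_apply, List.map_map]
      apply List.map_congr_left
      intro row hrow
      have h1 : 1 ≤ row.length := le_trans (by omega) (hlen row hrow)
      cases row with
      | nil => simp at h1
      | cons a t => rfl

theorem pvColOf_natCast (g : List (List Int)) (j : Nat) :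
    pvColOf g (j : Int) = g.map (fun row => row.getD j 0) := by
  simp [pvColOf]

-- main equality on grids that pass the guard
theorem pvMainEq (g : List (List Int))
    (hne : g ≠ []) (hhd : g.headD [] ≠ [])
    (hpre : ∀ row ∈ g, (g.headD []).length ≤ row.length) :
    connect_same_color_v g = connect_same_color_v_alt g := by
  obtain ⟨r0, grest, rfl⟩ : ∃ r0 grest, g = r0 :: grest := by
    cases g with
    | nil => exact absurd rfl hne
    | cons a t => exact ⟨a, t, rfl⟩
  set g : List (List Int) := r0 :: grest with hg
  set C : Nat := r0.length with hCdef
  set bg : Int := pvBg g with hbg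
  have hhd' : (g.headD []) = r0 := rfl
  have hC1 : 1 ≤ C := by
    rw [hCdef]
    rcases List.length_pos_iff.2 (by rwa [hhd'] at hhd) with h
    omega
  have hguard : ¬ (g = [] ∨ g.headD [] = []) := by
    push_neg
    exact ⟨hne, hhd⟩
  have hpre' : ∀ row ∈ g, C ≤ row.length := by
    intro row hrow
    have := hpre row hrow
    rwa [hhd'] at this
  -- A side
  have hA : connect_same_color_v g = pvAState g bg C := by
    rw [connect_same_color_v, if_neg hguard]
    have hinit : g.map (fun row => PySem.List.slice row none none) = g := by
      rw [List.map_congr_left (fun row _ => PySem.List.slice_none_none row)]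
      exact List.map_id g
    rw [hinit]
    have := pvOuter g bg C hpre' C le_rfl
    rw [hhd', ← hCdef]
    exact this
  -- B side pieces
  have hzip : pvZip g = (List.range C).map (fun j => g.map (fun row => row.getD j 0)) := by
    rw [pvZip]
    exact pvZipGo_spec C g hne hpre'
  have hcols : (pvZip g).map (fun col => pvFillCol col bg) =
      (List.range C).map (fun j => pvNewCol g bg j) := by
    rw [hzip, List.map_map]
    apply List.map_congr_left
    intro j _
    simp only [Function.comp_apply, pvNewCol, pvColOf_natCast]
  set NC : List (List Int) := (List.range C).map (fun j => pvNewCol g bg j) with hNC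
  have hNClen : NC.length = C := by simp [hNC]
  have hNCrows : ∀ col ∈ NC, col.length = g.length := by
    intro col hcol
    obtain ⟨j, _, rfl⟩ := List.mem_map.1 hcol
    exact pvNewCol_length g bg j
  have hNCne : NC ≠ [] := by
    intro h
    rw [h] at hNClen
    simp at hNClen
    omega
  -- transpose of the filled columns
  have hzip2 : pvZip NC =
      (List.range g.length).map (fun i => NC.map (fun col => col.getD i 0)) := by
    obtain ⟨a, t, hat⟩ : ∃ a t, NC = a :: t := by
      cases hx : NC with
      | nil => exact absurd hx hNCne
      | cons a t => exact ⟨a, t, rfl⟩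
    have halen : a.length = g.length := hNCrows a (by rw [hat]; simp)
    rw [hat, pvZip, ← hat, halen]
    exact pvZipGo_spec g.length NC hNCne (fun r hr => le_of_eq (hNCrows r hr).symm)
  -- B's result
  have hB : connect_same_color_v_alt g =
      (g.zip (pvZip NC)).map (fun p => p.2 ++ p.1.drop C) := by
    rw [connect_same_color_v_alt]
    rw [if_neg hguard]
    simp only [← hbg, hcols, ← hNC, hNClen]
    apply List.map_congr_left
    intro p _
    rw [PySem.List.slice_from_natCast]
  have hmm : ∀ i : Nat, NC.map (fun col => col.getD i 0) =
      (List.range C).map (fun j => (pvNewCol g bg j).getD i 0) := by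
    intro i
    rw [hNC, List.map_map]
    rfl
  rw [hA, hB, hzip2]
  -- both sides row by row
  apply List.ext_getElem
  · rw [pvAState_length]
    simp
  · intro i h1 h2
    have hig : i < g.length := by rw [pvAState_length] at h1; omega
    have hX : i < ((List.range g.length).map
        (fun i => NC.map (fun col => col.getD i 0))).length := by simp; omega
    rw [List.getElem_map, List.getElem_zip]
    rw [pvAState_getElem g bg C hpre' C le_rfl i hig]
    congr 1
    rw [List.getElem_map, List.getElem_range]
    exact (hmm i).symm

theorem pvGuardEq (g : List (List Int)) (h : g = [] ∨ g.headD [] = []) :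
    connect_same_color_v g = connect_same_color_v_alt g := by
  rw [connect_same_color_v, if_pos h, connect_same_color_v_alt, if_pos h]

-- ===== VERDICT (by name: the statement is the Claim_ definition above) =====
theorem connect_same_color_v_spec : Claim_equal_connect_same_color_v := by
  intro g _ hpre
  unfold Spec_connect_same_color_v
  by_cases h : g = [] ∨ g.headD [] = []
  · exact pvGuardEq g h
  · push_neg at h
    exact pvMainEq g h.1 h.2 hpre
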